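-- pv_equiv track=rewrite | github.com/lokeshsk1/LeetHub | 2975-maximum-square-area-by-removing-fences-from-a-field/2975-maximum-square-area-by-removing-fences-from-a-field.py | maximizeSquareArea
-- ===== SOURCE A (Python) =====
-- from typing import List
--
-- def maximizeSquareArea(m: int, n: int, hFences: List[int], vFences: List[int]) -> int:
--     mod = 10 ** 9 + 7
--     hFences += [1, m]
--     vFences += [1, n]
--     hFences.sort()
--     vFences.sort()
--     seen = set()
--     res = 0
--     for i in range(len(hFences) - 1):
--         for j in range(i + 1, len(hFences)):
--             seen.add(hFences[j] - hFences[i])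
--     for i in range(len(vFences) - 1):
--         for j in range(i + 1, len(vFences)):
--             if vFences[j] - vFences[i] in seen:
--                 res = max(res, ((vFences[j] - vFences[i]) * (vFences[j] - vFences[i])))
--     return res % mod if res != 0 else -1
-- ===== SOURCE B (Python) =====
-- def maximizeSquareArea(m: int, n: int, hFences, vFences) -> int:
--     mod = 10 ** 9 + 7
--     hFences += [1, m]
--     vFences += [1, n]
--     hFences.sort()
--     vFences.sort()
--     hpos = set(hFences)
--     vgaps = sorted({b - a for i, a in enumerate(vFences) for b in vFences[i + 1:]}, reverse=True)
--     for d in vgaps: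
--         if d > 0 and any(p + d in hpos for p in hFences):
--             return d * d % mod
--     return -1
-- ===== Notes on version B (the rewrite author's own statement) =====
-- stated objective: alternative
-- what changed: B never enumerates horizontal gaps: it keeps a set of horizontal fence POSITIONS, sorts the distinct vertical gaps descending, and early-returns on the first positive candidate d for which some horizontal position p has p+d also a position (a shift test), instead of A's precomputed O(H^2) h-gap set streamed against all vertical index pairs with a running max.
import Mathlib
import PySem

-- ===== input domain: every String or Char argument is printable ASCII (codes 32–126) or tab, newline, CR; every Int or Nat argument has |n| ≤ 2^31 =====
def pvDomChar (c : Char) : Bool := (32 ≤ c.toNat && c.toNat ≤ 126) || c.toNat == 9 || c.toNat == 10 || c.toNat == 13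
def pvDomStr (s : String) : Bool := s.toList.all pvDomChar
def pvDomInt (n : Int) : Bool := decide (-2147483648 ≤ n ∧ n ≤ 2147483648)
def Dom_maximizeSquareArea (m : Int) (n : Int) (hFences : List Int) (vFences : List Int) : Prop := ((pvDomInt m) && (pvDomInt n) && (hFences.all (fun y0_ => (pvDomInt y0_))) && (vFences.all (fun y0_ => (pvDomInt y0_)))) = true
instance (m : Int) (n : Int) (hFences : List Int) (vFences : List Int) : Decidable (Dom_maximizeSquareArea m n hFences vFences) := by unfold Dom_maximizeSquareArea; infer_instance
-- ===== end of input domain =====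

-- B drops A's horizontal-gap set entirely: it keeps a set of horizontal POSITIONS, sorts the
-- distinct vertical gaps descending and early-returns on the first positive candidate d such that
-- some position p has p + d also a position (objective: alternative). Both A and B extend and sort
-- the two argument lists in place identically; the equivalence proved here is about the return value.

-- ===== PORT A =====
def maximizeSquareArea (m : Int) (n : Int) (hFences : List Int) (vFences : List Int) : Int :=
  let md : Int := 10 ^ 9 + 7
  let hF := PySem.List.sorted (hFences ++ [1, m]) (fun x => x)
  let vF := PySem.List.sorted (vFences ++ [1, n]) (fun x => x)
  -- indices are always in range, so hFences[i] is pyGetD with an unused default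
  let seen : PySem.Set Int :=
    (PySem.List.pyRange 0 (PySem.List.len hF - 1)).foldl (fun s i =>
      (PySem.List.pyRange (i + 1) (PySem.List.len hF)).foldl (fun s j =>
        PySem.Set.add s (PySem.List.pyGetD hF j 0 - PySem.List.pyGetD hF i 0)) s)
      PySem.Set.empty
  let res : Int :=
    (PySem.List.pyRange 0 (PySem.List.len vF - 1)).foldl (fun r i =>
      (PySem.List.pyRange (i + 1) (PySem.List.len vF)).foldl (fun r j =>
        if PySem.Set.contains seen (PySem.List.pyGetD vF j 0 - PySem.List.pyGetD vF i 0) then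
          max r ((PySem.List.pyGetD vF j 0 - PySem.List.pyGetD vF i 0) *
                 (PySem.List.pyGetD vF j 0 - PySem.List.pyGetD vF i 0))
        else r) r) 0
  if res ≠ 0 then PySem.Int.mod res md else -1

-- ===== PORT B =====
def maximizeSquareArea_alt (m : Int) (n : Int) (hFences : List Int) (vFences : List Int) : Int :=
  let md : Int := 10 ^ 9 + 7
  let hF := PySem.List.sorted (hFences ++ [1, m]) (fun x => x)
  let vF := PySem.List.sorted (vFences ++ [1, n]) (fun x => x)
  let hpos : PySem.Set Int := PySem.Set.ofList hF
  let vgaps := PySem.List.sorted (PySem.Set.ofList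
      ((PySem.List.enumerate vF).flatMap (fun p =>
        (PySem.List.slice vF (some (p.1 + 1))).map (fun b => b - p.2)))) (fun x => x) true
  -- the for-loop with early return is a first-match search over vgaps
  match vgaps.find? (fun d => decide (0 < d) && hF.any (fun p => PySem.Set.contains hpos (p + d))) with
  | some d => PySem.Int.mod (d * d) md
  | none => -1

-- ===== PRECONDITION & SPEC =====
def Spec_maximizeSquareArea (m : Int) (n : Int) (hFences : List Int) (vFences : List Int) (out : Int) : Prop := out = maximizeSquareArea_alt m n hFences vFences
instance (m : Int) (n : Int) (hFences : List Int) (vFences : List Int) (out : Int) : Decidable (Spec_maximizeSquareArea m n hFences vFences out) := by unfold Spec_maximizeSquareArea; infer_instance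

-- ===== CLAIM (what is proved, stated in full; the proofs are below) =====
def Claim_equal_maximizeSquareArea : Prop := ∀ (m : Int) (n : Int) (hFences : List Int) (vFences : List Int), Dom_maximizeSquareArea m n hFences vFences → Spec_maximizeSquareArea m n hFences vFences (maximizeSquareArea m n hFences vFences)

-- ===== LEMMAS AND PROOFS =====

/-- All gaps `xs[j] - xs[i]`, `i < j`, in the common generation order of A's loops and B's comprehension. -/
def pvGaps : List Int → List Int
  | [] => []
  | x :: t => t.map (fun b => b - x) ++ pvGaps t

theorem pvGaps_nonneg (xs : List Int) (hs : xs.Pairwise (· ≤ ·)) :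
    ∀ d ∈ pvGaps xs, 0 ≤ d := by
  induction xs with
  | nil => simp [pvGaps]
  | cons x t ih =>
    rcases List.pairwise_cons.mp hs with ⟨hx, ht⟩
    intro d hd
    rcases List.mem_append.mp hd with h | h
    · rcases List.mem_map.mp h with ⟨b, hb, rfl⟩
      have := hx b hb; omega
    · exact ih ht d h

/-- Every gap is realised by a pair of positions. -/
theorem pvGaps_pair (xs : List Int) : ∀ d ∈ pvGaps xs, ∃ p ∈ xs, p + d ∈ xs := by
  induction xs with
  | nil => simp [pvGaps]
  | cons x t ih =>
    intro d hd
    rcases List.mem_append.mp hd with h | h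
    · rcases List.mem_map.mp h with ⟨b, hb, rfl⟩
      exact ⟨x, by simp, by simp [hb]⟩
    · rcases ih d h with ⟨p, hp, hpd⟩
      exact ⟨p, by simp [hp], by simp [hpd]⟩

/-- In a sorted list, any pair of positions `a < b` realises the gap `b - a`. -/
theorem pvGaps_of_pair (xs : List Int) (hs : xs.Pairwise (· ≤ ·)) :
    ∀ a ∈ xs, ∀ b ∈ xs, a < b → b - a ∈ pvGaps xs := by
  induction xs with
  | nil => simp
  | cons x t ih =>
    rcases List.pairwise_cons.mp hs with ⟨hx, ht⟩
    intro a ha b hb hab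
    rcases List.mem_cons.mp ha with rfl | hat
    · rcases List.mem_cons.mp hb with rfl | hbt
      · omega
      · exact List.mem_append.mpr (Or.inl (List.mem_map.mpr ⟨b, hbt, rfl⟩))
    · rcases List.mem_cons.mp hb with rfl | hbt
      · have := hx a hat; omega
      · exact List.mem_append.mpr (Or.inr (ih ht a hat b hbt hab))

/-- For a positive `d` and sorted `xs`: `d` is a gap iff a position shifted by `d` is a position. -/
theorem pvGaps_iff_shift (xs : List Int) (hs : xs.Pairwise (· ≤ ·)) (d : Int) (hd : 0 < d) :
    d ∈ pvGaps xs ↔ ∃ p ∈ xs, p + d ∈ xs := by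
  constructor
  · exact pvGaps_pair xs d
  · rintro ⟨p, hp, hpd⟩
    have := pvGaps_of_pair xs hs p hp (p + d) hpd (by omega)
    simpa using this

/-- B's enumerate/slice comprehension generates exactly `pvGaps` (generalized over a consumed prefix). -/
theorem pvFlatMap_aux (suf : List Int) : ∀ pre : List Int,
    (PySem.List.enumerate suf (pre.length)).flatMap (fun p =>
      (PySem.List.slice ((pre ++ suf)) (some (p.1 + 1))).map (fun b => b - p.2)) = pvGaps suf := by
  induction suf with
  | nil => intro pre; simp [PySem.List.enumerate, pvGaps]
  | cons x t ih =>
    intro pre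
    rw [PySem.List.enumerate_cons, List.flatMap_cons]
    have h1 : PySem.List.slice (pre ++ x :: t) (some ((pre.length : Int) + 1)) = t := by
      rw [PySem.List.slice_from _ (by positivity)]
      have : ((pre.length : Int) + 1).toNat = (pre ++ [x]).length := by simp
      rw [this, show pre ++ x :: t = (pre ++ [x]) ++ t by simp, List.drop_left]
    rw [h1]
    have h2 : (pre.length : Int) + 1 = ((pre ++ [x]).length : Int) := by simp
    have h3 : pre ++ x :: t = (pre ++ [x]) ++ t := by simp
    rw [h2, h3, ih (pre ++ [x])]
    rfl

theorem pvFlatMap_eq (xs : List Int) :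
    (PySem.List.enumerate xs).flatMap (fun p =>
      (PySem.List.slice xs (some (p.1 + 1))).map (fun b => b - p.2)) = pvGaps xs := by
  simpa using pvFlatMap_aux xs []

/-- A's nested index loops, started at index `k`, fold `F` over the gaps of the `k`-suffix. -/
theorem pvNested_aux {β : Type} (xs : List Int) (F : β → Int → β) :
    ∀ (fuel k : Nat), xs.length - k ≤ fuel → ∀ init : β,
    (PySem.List.pyRange (k : Int) (PySem.List.len xs)).foldl (fun acc i =>
      (PySem.List.pyRange (i + 1) (PySem.List.len xs)).foldl (fun acc j =>
        F acc (PySem.List.pyGetD xs j 0 - PySem.List.pyGetD xs i 0)) acc) init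
    = (pvGaps (xs.drop k)).foldl F init := by
  intro fuel
  induction fuel with
  | zero =>
    intro k hk init
    have hk' : xs.length ≤ k := by omega
    rw [PySem.List.pyRange_one_eq_nil (by simp [PySem.List.len_eq]; exact_mod_cast hk'),
        List.drop_of_length_le hk']
    rfl
  | succ f ihf =>
    intro k hk init
    by_cases hkl : xs.length ≤ k
    · rw [PySem.List.pyRange_one_eq_nil (by simp [PySem.List.len_eq]; exact_mod_cast hkl),
          List.drop_of_length_le hkl]
      rfl
    · push Not at hkl
      rw [PySem.List.pyRange_one_cons (by simp [PySem.List.len_eq]; exact_mod_cast hkl)]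
      rw [List.foldl_cons]
      have hcast : (k : Int) + 1 = ((k + 1 : Nat) : Int) := by push_cast; ring
      rw [hcast,
        PySem.List.foldl_pyRange_pyGetD xs 0 (fun acc b => F acc (b - PySem.List.pyGetD xs (k : Int) 0)) init (by positivity)]
      have hget : PySem.List.pyGetD xs (k : Int) 0 = xs[k] := by
        rw [PySem.List.pyGetD_natCast, List.getD_eq_getElem _ _ hkl]
      rw [List.drop_eq_getElem_cons hkl]
      show _ = ((xs.drop (k + 1)).map (fun b => b - xs[k]) ++ pvGaps (xs.drop (k + 1))).foldl F _
      rw [List.foldl_append, List.foldl_map, hget]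
      have ht : ((k + 1 : Nat) : Int).toNat = k + 1 := by simp
      rw [ht]
      exact ihf (k + 1) (by omega) _

/-- A's nested index loops are a fold of `F` over `pvGaps` (the last outer index is dropped: its inner range is empty). -/
theorem pvNested_eq {β : Type} (xs : List Int) (F : β → Int → β) (init : β) :
    (PySem.List.pyRange 0 (PySem.List.len xs - 1)).foldl (fun acc i =>
      (PySem.List.pyRange (i + 1) (PySem.List.len xs)).foldl (fun acc j =>
        F acc (PySem.List.pyGetD xs j 0 - PySem.List.pyGetD xs i 0)) acc) init
    = (pvGaps xs).foldl F init := by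
  have hfull := pvNested_aux xs F xs.length 0 (by omega) init
  rcases Nat.eq_zero_or_pos xs.length with h0 | hpos
  · rw [PySem.List.pyRange_one_eq_nil (by simp [PySem.List.len_eq, h0]),
        show xs = [] from List.length_eq_zero_iff.mp h0]
    rfl
  · have hL : PySem.List.len xs = ((xs.length - 1 : Nat) : Int) + 1 := by
      simp [PySem.List.len_eq]; omega
    have hsplit : PySem.List.pyRange 0 (PySem.List.len xs) =
        PySem.List.pyRange 0 (PySem.List.len xs - 1) ++ [PySem.List.len xs - 1] := by
      rw [hL, PySem.List.pyRange_one_succ_right (by positivity)]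
      simp
    have hlast : (PySem.List.pyRange ((PySem.List.len xs - 1) + 1) (PySem.List.len xs)) = [] := by
      apply PySem.List.pyRange_one_eq_nil; omega
    rw [show ((0 : Nat) : Int) = (0 : Int) by simp] at hfull
    rw [hsplit, List.foldl_append] at hfull
    simp only [List.foldl_cons, List.foldl_nil, hlast] at hfull
    rw [List.drop_zero] at hfull
    exact hfull

theorem pvSq_fold (ds : List Int) (hnn : ∀ d ∈ ds, 0 ≤ d) (s : Int) (hs : 0 ≤ s) :
    ds.foldl (fun r d => max r (d * d)) (s * s) =
      (ds.foldl max s) * (ds.foldl max s) := by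
  induction ds generalizing s with
  | nil => rfl
  | cons d t ih =>
    have hd : 0 ≤ d := hnn d (by simp)
    have h1 : max (s * s) (d * d) = (max s d) * (max s d) := by
      rcases le_total s d with h | h
      · rw [max_eq_right h, max_eq_right (by nlinarith)]
      · rw [max_eq_left h, max_eq_left (by nlinarith)]
    simp only [List.foldl_cons, h1]
    exact ih (fun x hx => hnn x (by simp [hx])) _ (le_max_of_le_left hs)

/-- `find?` on a descending list picks the maximum element satisfying the predicate. -/
theorem pvFind_max {P : Int → Bool} {L : List Int} (hL : L.Pairwise (fun a b => b ≤ a)) {d : Int}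
    (h : L.find? P = some d) : P d = true ∧ d ∈ L ∧ ∀ x ∈ L, P x = true → x ≤ d := by
  induction L with
  | nil => simp at h
  | cons y t ih =>
    rcases List.pairwise_cons.mp hL with ⟨hy, ht⟩
    by_cases hPy : P y = true
    · rw [List.find?_cons_of_pos hPy] at h
      cases h
      refine ⟨hPy, by simp, ?_⟩
      intro x hx _
      rcases List.mem_cons.mp hx with rfl | hxt
      · exact le_refl _
      · exact hy x hxt
    · rw [List.find?_cons_of_neg (by simpa using hPy)] at h
      rcases ih ht h with ⟨h1, h2, h3⟩
      refine ⟨h1, by simp [h2], ?_⟩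
      intro x hx hPx
      rcases List.mem_cons.mp hx with rfl | hxt
      · exact absurd hPx hPy
      · exact h3 x hxt hPx

/-- Core: A's filtered running max-of-squares equals B's first-hit search on descending candidates. -/
theorem pvCore (hL vL : List Int) (hh : hL.Pairwise (· ≤ ·)) (hv : vL.Pairwise (· ≤ ·)) :
    (if (pvGaps vL).foldl (fun r d =>
          if PySem.Set.contains (PySem.Set.ofList (pvGaps hL)) d then max r (d * d) else r) 0 ≠ 0
     then PySem.Int.mod ((pvGaps vL).foldl (fun r d =>
          if PySem.Set.contains (PySem.Set.ofList (pvGaps hL)) d then max r (d * d) else r) 0) (10 ^ 9 + 7)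
     else -1)
    = (match (PySem.List.sorted (PySem.Set.ofList (pvGaps vL)) (fun x => x) true).find?
          (fun d => decide (0 < d) && hL.any (fun p => PySem.Set.contains (PySem.Set.ofList hL) (p + d))) with
       | some d => PySem.Int.mod (d * d) (10 ^ 9 + 7)
       | none => -1) := by
  set P : Int → Bool :=
    fun d => decide (0 < d) && hL.any (fun p => PySem.Set.contains (PySem.Set.ofList hL) (p + d)) with hP
  set L := PySem.List.sorted (PySem.Set.ofList (pvGaps vL)) (fun x => x) true with hLdef
  have hLpair : L.Pairwise (fun a b => b ≤ a) := PySem.List.sorted_pairwise_rev _ _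
  have hLmem : ∀ x, x ∈ L ↔ x ∈ pvGaps vL := by
    intro x
    rw [hLdef, PySem.List.mem_sorted, PySem.Set.mem_ofList]
  have hPiff : ∀ d, P d = true ↔ 0 < d ∧ d ∈ pvGaps hL := by
    intro d
    rw [hP]
    simp only [Bool.and_eq_true, decide_eq_true_eq, List.any_eq_true]
    constructor
    · rintro ⟨hd, p, hp, hc⟩
      rw [PySem.Set.contains_iff, PySem.Set.mem_ofList] at hc
      exact ⟨hd, (pvGaps_iff_shift hL hh d hd).mpr ⟨p, hp, hc⟩⟩
    · rintro ⟨hd, hg⟩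
      rcases (pvGaps_iff_shift hL hh d hd).mp hg with ⟨p, hp, hpd⟩
      exact ⟨hd, p, hp, by rw [PySem.Set.contains_iff, PySem.Set.mem_ofList]; exact hpd⟩
  set fl := (pvGaps vL).filter (fun d => PySem.Set.contains (PySem.Set.ofList (pvGaps hL)) d) with hfl
  have hflmem : ∀ x, x ∈ fl ↔ x ∈ pvGaps vL ∧ x ∈ pvGaps hL := by
    intro x
    rw [hfl, List.mem_filter, PySem.Set.contains_iff, PySem.Set.mem_ofList]
  set M := fl.foldl max 0 with hM
  have hres : (pvGaps vL).foldl (fun r d =>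
      if PySem.Set.contains (PySem.Set.ofList (pvGaps hL)) d then max r (d * d) else r) 0 = M * M := by
    rw [← List.foldl_filter (p := fun d => PySem.Set.contains (PySem.Set.ofList (pvGaps hL)) d)
          (f := fun r d => max r (d * d))]
    have := pvSq_fold fl (fun d hd => pvGaps_nonneg vL hv d ((hflmem d).mp hd).1) 0 le_rfl
    simpa only [mul_zero] using this
  have hM0 : 0 ≤ M := (PySem.List.le_foldl_max fl 0).1
  rw [hres]
  cases hfind : L.find? P with
  | some d =>
    rcases pvFind_max hLpair hfind with ⟨hPd, hdL, hmax⟩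
    rcases (hPiff d).mp hPd with ⟨hd0, hdh⟩
    have hdfl : d ∈ fl := (hflmem d).mpr ⟨(hLmem d).mp hdL, hdh⟩
    have hdM : d ≤ M := (PySem.List.le_foldl_max fl 0).2 d hdfl
    have hMd : M ≤ d := by
      rcases PySem.List.foldl_max_mem fl 0 with h | h
      · omega
      · refine hmax M ((hLmem M).mpr ((hflmem M).mp h).1) ((hPiff M).mpr ⟨by omega, ((hflmem M).mp h).2⟩)
    have hMeq : M = d := le_antisymm hMd hdM
    rw [hMeq, if_pos (by nlinarith)]
  | none =>
    have hnone : ∀ x ∈ L, ¬ P x = true := by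
      intro x hx
      exact fun hPx => by simpa [hfind] using (List.find?_eq_none.mp hfind) x hx hPx
    have hMz : M = 0 := by
      rcases PySem.List.foldl_max_mem fl 0 with h | h
      · exact h
      · rcases (hflmem M).mp h with ⟨hMv, hMh⟩
        by_cases hM0' : 0 < M
        · exact absurd ((hPiff M).mpr ⟨hM0', hMh⟩) (hnone M ((hLmem M).mpr hMv))
        · omega
    rw [hMz]
    norm_num

-- ===== VERDICT (by name: the statement is the Claim_ definition above) =====
theorem maximizeSquareArea_spec : Claim_equal_maximizeSquareArea := by
  intro m n hFences vFences _
  unfold Spec_maximizeSquareArea maximizeSquareArea maximizeSquareArea_alt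
  set hL := PySem.List.sorted (hFences ++ [1, m]) (fun x => x) with hhL
  set vL := PySem.List.sorted (vFences ++ [1, n]) (fun x => x) with hvL
  have hhp : hL.Pairwise (· ≤ ·) := PySem.List.sorted_pairwise _ _
  have hvp : vL.Pairwise (· ≤ ·) := PySem.List.sorted_pairwise _ _
  show (let seen : PySem.Set Int :=
          (PySem.List.pyRange 0 (PySem.List.len hL - 1)).foldl (fun s i =>
            (PySem.List.pyRange (i + 1) (PySem.List.len hL)).foldl (fun s j =>
              PySem.Set.add s (PySem.List.pyGetD hL j 0 - PySem.List.pyGetD hL i 0)) s)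
            PySem.Set.empty
        let res : Int :=
          (PySem.List.pyRange 0 (PySem.List.len vL - 1)).foldl (fun r i =>
            (PySem.List.pyRange (i + 1) (PySem.List.len vL)).foldl (fun r j =>
              if PySem.Set.contains seen (PySem.List.pyGetD vL j 0 - PySem.List.pyGetD vL i 0) then
                max r ((PySem.List.pyGetD vL j 0 - PySem.List.pyGetD vL i 0) *
                       (PySem.List.pyGetD vL j 0 - PySem.List.pyGetD vL i 0))
              else r) r) 0
        if res ≠ 0 then PySem.Int.mod res (10 ^ 9 + 7) else -1) = _
  simp only []
  rw [pvNested_eq hL (fun s d => PySem.Set.add s d) PySem.Set.empty,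
      show (PySem.Set.empty : PySem.Set Int) = [] from rfl, ← PySem.Set.ofList_eq_foldl]
  rw [pvNested_eq vL
        (fun r d => if PySem.Set.contains (PySem.Set.ofList (pvGaps hL)) d then max r (d * d) else r) 0]
  show _ = (let hpos : PySem.Set Int := PySem.Set.ofList hL
            let vgaps := PySem.List.sorted (PySem.Set.ofList
                ((PySem.List.enumerate vL).flatMap (fun p =>
                  (PySem.List.slice vL (some (p.1 + 1))).map (fun b => b - p.2)))) (fun x => x) true
            match vgaps.find? (fun d => decide (0 < d) && hL.any (fun p => PySem.Set.contains hpos (p + d))) with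
            | some d => PySem.Int.mod (d * d) (10 ^ 9 + 7)
            | none => -1)
  simp only []
  rw [pvFlatMap_eq vL]
  exact pvCore hL vL hhp hvp
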